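-- pv_equiv track=rewrite | github.com/ningchunlei/okcoin | okcoin_websocket.py | findMaxSupport
-- ===== SOURCE A (Python) =====
-- def findMaxSupport(data):
--     for d,v in data:
--         if v>20 :
--             return d,v
--
--     ret = None
--     for d,v in data:
--         if ret==None:
--             ret = (d,v)
--         elif ret[1]<v:
--             ret = (d,v)
--     return ret
-- ===== SOURCE B (Python) =====
-- def findMaxSupport(data):
--     best = None
--     for d, v in data:
--         if v > 20:
--             return d, v
--         if best is None or best[1] < v:
--             best = (d, v)
--     return best
-- ===== Notes on version B (the rewrite author's own statement) =====
-- stated objective: simpler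
-- what changed: Fuses A's two sequential passes (search for first v>20, then separate max-by-value scan) into a single loop that early-returns on v>20 and otherwise maintains the running best pair.
import Mathlib
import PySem

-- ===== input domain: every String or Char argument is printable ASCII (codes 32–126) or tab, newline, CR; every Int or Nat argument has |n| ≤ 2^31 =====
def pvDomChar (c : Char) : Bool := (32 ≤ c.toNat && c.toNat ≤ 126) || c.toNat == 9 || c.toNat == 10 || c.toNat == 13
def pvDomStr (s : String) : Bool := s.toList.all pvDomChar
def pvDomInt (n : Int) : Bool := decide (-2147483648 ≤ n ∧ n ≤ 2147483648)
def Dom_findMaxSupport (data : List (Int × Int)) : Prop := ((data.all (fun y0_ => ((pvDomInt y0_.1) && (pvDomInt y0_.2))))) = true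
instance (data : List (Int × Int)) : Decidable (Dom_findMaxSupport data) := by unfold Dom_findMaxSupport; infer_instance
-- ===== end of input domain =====

-- B fuses A's two passes (first v>20 search, then max-by-value scan) into one loop; objective: simpler.

-- ===== PORT A =====
-- A's first loop: return the first (d,v) with v>20, else fall through (none).
def pvFirstGT20 : List (Int × Int) → Option (Int × Int)
  | [] => none
  | (d, v) :: t => if v > 20 then some (d, v) else pvFirstGT20 t

-- A's second loop body: ret update.
def pvStep (ret : Option (Int × Int)) (p : Int × Int) : Option (Int × Int) :=
  match ret with
  | none => some p
  | some r => if r.2 < p.2 then some p else some r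

def findMaxSupport (data : List (Int × Int)) : Option (Int × Int) :=
  match pvFirstGT20 data with
  | some r => some r
  | none => data.foldl pvStep none

-- ===== PORT B =====
-- single fused loop with accumulator best
def pvFused : List (Int × Int) → Option (Int × Int) → Option (Int × Int)
  | [], best => best
  | (d, v) :: t, best =>
    if v > 20 then some (d, v)
    else pvFused t (match best with
      | none => some (d, v)
      | some r => if r.2 < v then some (d, v) else some r)

def findMaxSupport_alt (data : List (Int × Int)) : Option (Int × Int) :=
  pvFused data none

-- ===== PRECONDITION & SPEC =====
def Spec_findMaxSupport (data : List (Int × Int)) (out : Option (Int × Int)) : Prop := out = findMaxSupport_alt data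
instance (data : List (Int × Int)) (out : Option (Int × Int)) : Decidable (Spec_findMaxSupport data out) := by unfold Spec_findMaxSupport; infer_instance

-- ===== CLAIM (what is proved, stated in full; the proofs are below) =====
def Claim_equal_findMaxSupport : Prop := ∀ (data : List (Int × Int)), Dom_findMaxSupport data → Spec_findMaxSupport data (findMaxSupport data)

-- ===== LEMMAS AND PROOFS =====
theorem pvFused_eq (data : List (Int × Int)) (best : Option (Int × Int)) :
    pvFused data best =
      match pvFirstGT20 data with
      | some r => some r
      | none => data.foldl pvStep best := by
  induction data generalizing best with
  | nil => simp [pvFused, pvFirstGT20]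
  | cons p t ih =>
    obtain ⟨d, v⟩ := p
    by_cases h : v > 20
    · simp [pvFused, pvFirstGT20, h]
    · simp only [pvFused, pvFirstGT20, if_neg h, List.foldl_cons]
      rw [ih]
      rfl

-- ===== VERDICT (by name: the statement is the Claim_ definition above) =====
theorem findMaxSupport_spec : Claim_equal_findMaxSupport := by
  intro data _
  unfold Spec_findMaxSupport findMaxSupport findMaxSupport_alt
  rw [pvFused_eq]
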